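-- pv_equiv track=rewrite | github.com/jamesgregorystewart/LeetCode | src/eopi/ch05_arrays/5-20_compute_pascals_triangle.py | first_n_rows_of_pascals_triangle
-- ===== SOURCE A (Python) =====
-- from typing import List
--
-- def first_n_rows_of_pascals_triangle(n: int) -> List[List[int]]:
--     triangle = []
--
--     for i in range(1, n+1):
--         row = []
--         for j in range(i):
--             if j == 0 or j == i - 1:
--                 row.append(1)
--             else:
--                 row.append(triangle[i-2][j-1]+triangle[i-2][j])
--         triangle.append(row)
--     return triangle
-- ===== SOURCE B (Python) =====
-- def first_n_rows_of_pascals_triangle(n):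
--     triangle = []
--     row = [1]
--     for _ in range(n):
--         triangle.append(row)
--         row = [x + y for x, y in zip([0] + row, row + [0])]
--     return triangle
-- ===== Notes on version B (the rewrite author's own statement) =====
-- stated objective: simpler
-- what changed: Each row is built from the previous row by shifted element-wise addition (zip of [0]+row with row+[0]) instead of indexing back into the accumulated 2D triangle with per-cell boundary tests.
import Mathlib
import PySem

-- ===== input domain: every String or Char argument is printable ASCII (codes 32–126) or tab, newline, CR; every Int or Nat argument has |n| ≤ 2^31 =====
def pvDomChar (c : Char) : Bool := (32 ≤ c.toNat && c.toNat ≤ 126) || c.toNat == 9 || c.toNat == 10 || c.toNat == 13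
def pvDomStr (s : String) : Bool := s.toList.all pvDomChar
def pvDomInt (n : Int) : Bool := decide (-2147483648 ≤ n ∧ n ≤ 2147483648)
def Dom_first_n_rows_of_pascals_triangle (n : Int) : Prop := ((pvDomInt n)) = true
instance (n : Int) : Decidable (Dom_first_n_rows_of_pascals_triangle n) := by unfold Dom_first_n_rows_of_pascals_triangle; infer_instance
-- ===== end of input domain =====

-- B builds each row from the previous one by shifted element-wise addition instead of
-- indexing back into the accumulated triangle with per-cell boundary tests (objective: simpler).

-- ===== PORT A =====
def first_n_rows_of_pascals_triangle (n : Int) : List (List Int) :=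
  (PySem.List.pyRange 1 (n+1) 1).foldl
    (fun triangle i =>
      triangle ++ [(PySem.List.pyRange 0 i 1).foldl
        (fun row j =>
          if j = 0 ∨ j = i - 1 then row ++ [(1 : Int)]
          else row ++ [PySem.List.pyGetD (PySem.List.pyGetD triangle (i-2) []) (j-1) 0 +
                       PySem.List.pyGetD (PySem.List.pyGetD triangle (i-2) []) j 0]) []]) []

-- ===== PORT B =====
-- [x + y for x, y in zip([0] + row, row + [0])]
def pvPascalNext (row : List Int) : List Int :=
  List.zipWith (· + ·) (0 :: row) (row ++ [0])

def first_n_rows_of_pascals_triangle_alt (n : Int) : List (List Int) :=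
  ((List.range n.toNat).foldl
    (fun (st : List (List Int) × List Int) _ => (st.1 ++ [st.2], pvPascalNext st.2))
    ([], [1])).1

-- ===== PRECONDITION & SPEC =====
def Spec_first_n_rows_of_pascals_triangle (n : Int) (out : List (List Int)) : Prop := out = first_n_rows_of_pascals_triangle_alt n
instance (n : Int) (out : List (List Int)) : Decidable (Spec_first_n_rows_of_pascals_triangle n out) := by unfold Spec_first_n_rows_of_pascals_triangle; infer_instance

-- ===== CLAIM (what is proved, stated in full; the proofs are below) =====
def Claim_equal_first_n_rows_of_pascals_triangle : Prop := ∀ (n : Int), Dom_first_n_rows_of_pascals_triangle n → Spec_first_n_rows_of_pascals_triangle n (first_n_rows_of_pascals_triangle n)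

-- ===== LEMMAS AND PROOFS =====

/-- The k-th row of Pascal's triangle, as B iterates it. -/
def pascalIter : Nat → List Int
  | 0 => [1]
  | k+1 => pvPascalNext (pascalIter k)

theorem length_pvPascalNext (p : List Int) : (pvPascalNext p).length = p.length + 1 := by
  simp [pvPascalNext]

theorem length_pascalIter (k : Nat) : (pascalIter k).length = k + 1 := by
  induction k with
  | zero => rfl
  | succ k ih => simp [pascalIter, length_pvPascalNext, ih]

theorem pascalIter_first (k : Nat) : (pascalIter k)[0]? = some 1 := by
  induction k with
  | zero => rfl
  | succ k ih =>
    have h : 0 < (pascalIter (k+1)).length := by rw [length_pascalIter]; omega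
    have h0 : 0 < (pascalIter k).length := by rw [length_pascalIter]; omega
    rw [List.getElem?_eq_getElem h]
    simp only [pascalIter, pvPascalNext]
    rw [List.getElem_zipWith]
    simp only [List.getElem_cons_zero]
    rw [List.getElem_append_left h0]
    have h1 : (pascalIter k)[0] = 1 := by
      have := ih; rw [List.getElem?_eq_getElem h0] at this; simpa using this
    simp [h1]

theorem pascalIter_last (k : Nat) : (pascalIter k)[k]? = some 1 := by
  induction k with
  | zero => rfl
  | succ k ih =>
    have hlen : (pascalIter k).length = k + 1 := length_pascalIter k
    have h : k + 1 < (pascalIter (k+1)).length := by rw [length_pascalIter]; omega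
    rw [List.getElem?_eq_getElem h]
    simp only [pascalIter, pvPascalNext]
    rw [List.getElem_zipWith]
    simp only [List.getElem_cons_succ]
    have hk : k < (pascalIter k).length := by omega
    rw [List.getElem_append_right (by omega)]
    have h1 : (pascalIter k)[k] = 1 := by
      have := ih; rw [List.getElem?_eq_getElem hk] at this; simpa using this
    simp [hlen, h1]

/-- A's `if`-guarded append loop, with the `if` pushed into the appended element. -/
theorem foldl_ite_push {α β : Type} (l : List β) (P : β → Prop) [DecidablePred P]
    (f g : β → α) (init : List α) :
    l.foldl (fun acc x => if P x then acc ++ [f x] else acc ++ [g x]) init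
    = init ++ l.map (fun x => if P x then f x else g x) := by
  have h : (fun (acc : List α) x => if P x then acc ++ [f x] else acc ++ [g x])
      = (fun acc x => acc ++ [if P x then f x else g x]) := by
    funext acc x; split <;> rfl
  rw [h, PySem.List.foldl_append_singleton_eq_map]

/-- A's inner row loop, seen as a map, builds exactly `pvPascalNext p` when `p` is the
previous row: length m+1, first and last entry 1, and the row index is m+2. -/
theorem row_eq (p : List Int) (m : Nat) (hlen : p.length = m + 1)
    (h0 : p[0]? = some 1) (hl : p[m]? = some 1) :
    ((PySem.List.pyRange 0 ((m : Int) + 2) 1).map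
      (fun j => if j = 0 ∨ j = (m : Int) + 2 - 1 then (1 : Int)
                else PySem.List.pyGetD p (j-1) 0 + PySem.List.pyGetD p j 0))
    = pvPascalNext p := by
  apply List.ext_getElem
  · simp [PySem.List.length_pyRange_one, pvPascalNext, hlen]
    omega
  intro k hk1 hk2
  have hkm : k < m + 2 := by
    have := hk1
    simp [PySem.List.length_pyRange_one] at this
    omega
  rw [List.getElem_map, PySem.List.getElem_pyRange_one]
  simp only [pvPascalNext]
  rw [List.getElem_zipWith]
  rcases Nat.eq_or_lt_of_le (Nat.zero_le k) with h0k | h0k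
  · -- k = 0
    subst h0k
    have hp0 : 0 < p.length := by omega
    simp only [List.getElem_cons_zero]
    rw [List.getElem_append_left hp0]
    have h1 : p[0] = 1 := by
      have := h0; rw [List.getElem?_eq_getElem hp0] at this; simpa using this
    simp [h1]
  · -- k ≥ 1
    obtain ⟨k', rfl⟩ : ∃ k', k = k' + 1 := ⟨k - 1, by omega⟩
    simp only [List.getElem_cons_succ]
    by_cases hlast : k' + 1 = m + 1
    · -- last position
      have hifc : ((0 : Int) + (↑(k'+1) : Int) = 0 ∨ (0 : Int) + (↑(k'+1) : Int) = (m : Int) + 2 - 1) := by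
        right; push_cast; omega
      rw [if_pos hifc]
      rw [List.getElem_append_right (by omega)]
      have hk'm : k' = m := by omega
      subst hk'm
      have hkp : k' < p.length := by omega
      have hp : p[k'] = 1 := by
        have := hl; rw [List.getElem?_eq_getElem hkp] at this; simpa using this
      simp [hlen, hp]
    · -- interior position
      have hifc : ¬((0 : Int) + (↑(k'+1) : Int) = 0 ∨ (0 : Int) + (↑(k'+1) : Int) = (m : Int) + 2 - 1) := by
        push_cast; omega
      rw [if_neg hifc]
      have hk'p : k' < p.length := by omega
      have hk1p : k' + 1 < p.length := by omega
      have e1 : (0 : Int) + (↑(k'+1) : Int) - 1 = ((k' : Nat) : Int) := by push_cast; omega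
      have e2 : (0 : Int) + (↑(k'+1) : Int) = ((k' + 1 : Nat) : Int) := by push_cast; omega
      rw [e1, e2, PySem.List.pyGetD_natCast, PySem.List.pyGetD_natCast]
      rw [List.getD_eq_getElem _ _ hk'p, List.getD_eq_getElem _ _ hk1p]
      rw [List.getElem_append_left hk1p]

/-- Invariant for A's outer loop. -/
theorem a_outer (c t : Nat) :
    (List.range' t c).foldl
      (fun (triangle : List (List Int)) (k : Nat) =>
        triangle ++ [((PySem.List.pyRange 0 (1 + (k : Int)) 1).foldl
          (fun row j =>
            if j = 0 ∨ j = 1 + (k : Int) - 1 then row ++ [(1 : Int)]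
            else row ++ [PySem.List.pyGetD (PySem.List.pyGetD triangle (1 + (k : Int) - 2) []) (j-1) 0 +
                         PySem.List.pyGetD (PySem.List.pyGetD triangle (1 + (k : Int) - 2) []) j 0]) [])])
      ((List.range t).map pascalIter)
    = (List.range (t + c)).map pascalIter := by
  induction c generalizing t with
  | zero => simp
  | succ c ih =>
    rw [List.range'_succ, List.foldl_cons]
    have hstep :
        ((List.range t).map pascalIter) ++
          [((PySem.List.pyRange 0 (1 + (t : Int)) 1).foldl
            (fun row j =>
              if j = 0 ∨ j = 1 + (t : Int) - 1 then row ++ [(1 : Int)]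
              else row ++ [PySem.List.pyGetD (PySem.List.pyGetD ((List.range t).map pascalIter) (1 + (t : Int) - 2) []) (j-1) 0 +
                           PySem.List.pyGetD (PySem.List.pyGetD ((List.range t).map pascalIter) (1 + (t : Int) - 2) []) j 0]) [])]
        = (List.range (t+1)).map pascalIter := by
      rw [foldl_ite_push]
      rw [List.range_succ, List.map_append]
      simp only [List.nil_append, List.map_cons, List.map_nil, List.append_cancel_left_eq,
        List.cons.injEq, and_true]
      cases t with
      | zero => decide
      | succ s =>
        have hprev : PySem.List.pyGetD ((List.range (s+1)).map pascalIter) (1 + ((s+1 : Nat) : Int) - 2) [] = pascalIter s := by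
          have e : 1 + ((s+1 : Nat) : Int) - 2 = ((s : Nat) : Int) := by push_cast; ring
          rw [e, PySem.List.pyGetD_natCast]
          rw [List.getD_eq_getElem _ _ (by simp)]
          simp
        rw [hprev]
        have e2 : 1 + ((s+1 : Nat) : Int) = ((s : Nat) : Int) + 2 := by push_cast; ring
        rw [e2]
        exact row_eq (pascalIter s) s (length_pascalIter s) (pascalIter_first s) (pascalIter_last s)
    rw [hstep]
    rw [ih (t+1)]
    rw [show t + 1 + c = t + (c + 1) from by omega]

/-- Invariant for B's loop (the counter value is ignored by the step). -/
theorem b_loop (c t : Nat) (l : List Nat) (hc : l.length = c) :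
    l.foldl
      (fun (st : List (List Int) × List Int) _ => (st.1 ++ [st.2], pvPascalNext st.2))
      ((List.range t).map pascalIter, pascalIter t)
    = ((List.range (t + c)).map pascalIter, pascalIter (t + c)) := by
  induction c generalizing t l with
  | zero =>
    rw [List.length_eq_zero_iff] at hc; subst hc; simp
  | succ c ih =>
    cases l with
    | nil => simp at hc
    | cons x xs =>
      simp only [List.foldl_cons]
      have hrow : ((List.range t).map pascalIter) ++ [pascalIter t] = (List.range (t+1)).map pascalIter := by
        rw [List.range_succ]; simp
      rw [hrow]
      have hnext : pvPascalNext (pascalIter t) = pascalIter (t+1) := rfl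
      rw [hnext, ih (t+1) xs (by simpa using hc)]
      rw [show t + 1 + c = t + (c + 1) from by omega]

-- ===== VERDICT (by name: the statement is the Claim_ definition above) =====
theorem first_n_rows_of_pascals_triangle_spec : Claim_equal_first_n_rows_of_pascals_triangle := by
  intro n _
  unfold Spec_first_n_rows_of_pascals_triangle
  unfold first_n_rows_of_pascals_triangle first_n_rows_of_pascals_triangle_alt
  rw [PySem.List.pyRange_one, List.foldl_map]
  have hto : (n + 1 - 1).toNat = n.toNat := by omega
  rw [hto]
  have hb := b_loop n.toNat 0 (List.range n.toNat) (by simp)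
  simp only [List.range_zero, List.map_nil, Nat.zero_add] at hb
  rw [show (pascalIter 0) = [1] from rfl] at hb
  rw [hb]
  have ha := a_outer n.toNat 0
  simp only [List.range_zero, List.map_nil, Nat.zero_add] at ha
  rw [← List.range_eq_range'] at ha
  exact ha
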